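-- pv_equiv track=rewrite | github.com/odylith/odylith | src/odylith/runtime/context_engine/turn_context_runtime.py | _path_under_roots
-- ===== SOURCE A (Python) =====
-- from typing import Sequence
--
-- def _path_under_roots(path_ref: str, roots: Sequence[str]) -> bool:
--     normalized = str(path_ref or "").strip().strip("/")
--     if not normalized:
--         return False
--     return any(
--         normalized == root or normalized.startswith(f"{root}/")
--         for root in roots
--         if str(root).strip()
--     )
-- ===== SOURCE B (Python) =====
-- def _path_under_roots(path_ref, roots):
--     normalized = str(path_ref or "").strip().strip("/")
--     if not normalized:
--         return False
--     prefixes = {normalized}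
--     for i, ch in enumerate(normalized):
--         if ch == '/':
--             prefixes.add(normalized[:i])
--     return any(str(root).strip() and root in prefixes for root in roots)
-- ===== Notes on version B (the rewrite author's own statement) =====
-- stated objective: alternative
-- what changed: B builds the set of the normalized path's '/'-boundary ancestor prefixes once and tests each root by set membership, instead of A's per-root equality-or-startswith string scan.
import Mathlib
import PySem

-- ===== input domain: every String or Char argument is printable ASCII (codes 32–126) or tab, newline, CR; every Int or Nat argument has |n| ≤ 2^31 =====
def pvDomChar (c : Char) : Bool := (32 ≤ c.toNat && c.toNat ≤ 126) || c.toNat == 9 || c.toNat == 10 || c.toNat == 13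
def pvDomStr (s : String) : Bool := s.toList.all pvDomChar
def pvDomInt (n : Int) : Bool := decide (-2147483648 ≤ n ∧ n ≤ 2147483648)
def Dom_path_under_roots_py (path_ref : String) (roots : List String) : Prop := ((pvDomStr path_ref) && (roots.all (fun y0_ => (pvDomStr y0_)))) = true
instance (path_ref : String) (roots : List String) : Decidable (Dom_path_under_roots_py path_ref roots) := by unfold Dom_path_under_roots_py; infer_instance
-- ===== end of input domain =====

-- B replaces A's per-root equality/startswith scan with a set of the normalized
-- path's '/'-boundary prefixes built once, then membership tests per root (objective: alternative).

-- ===== PORT A =====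
def path_under_roots_py (path_ref : String) (roots : List String) : Bool :=
  -- normalized = str(path_ref or "").strip().strip("/")
  let normalized := PySem.Chars.stripChars
      (PySem.Chars.strip (if path_ref.toList = [] then [] else path_ref.toList)) ['/']
  if normalized = [] then false
  else
    roots.any (fun root =>
      if PySem.Chars.strip root.toList ≠ [] then
        (normalized == root.toList) || PySem.Chars.startswith normalized (root.toList ++ ['/'])
      else false)

-- ===== PORT B =====
def path_under_roots_py_alt (path_ref : String) (roots : List String) : Bool :=
  let normalized := PySem.Chars.stripChars
      (PySem.Chars.strip (if path_ref.toList = [] then [] else path_ref.toList)) ['/']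
  if normalized = [] then false
  else
    -- prefixes = {normalized}; for i, ch in enumerate(normalized): if ch == '/': prefixes.add(normalized[:i])
    let prefixes : PySem.Set (List Char) :=
      (PySem.List.enumerate normalized).foldl
        (fun s p =>
          if p.2 = '/' then PySem.Set.add s (PySem.List.slice normalized none (some p.1)) else s)
        (PySem.Set.ofList [normalized])
    roots.any (fun root =>
      (!decide (PySem.Chars.strip root.toList = [])) && PySem.Set.contains prefixes root.toList)

-- ===== PRECONDITION & SPEC =====
def Spec_path_under_roots_py (path_ref : String) (roots : List String) (out : Bool) : Prop := out = path_under_roots_py_alt path_ref roots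
instance (path_ref : String) (roots : List String) (out : Bool) : Decidable (Spec_path_under_roots_py path_ref roots out) := by unfold Spec_path_under_roots_py; infer_instance

-- ===== CLAIM (what is proved, stated in full; the proofs are below) =====
def Claim_equal_path_under_roots_py : Prop := ∀ (path_ref : String) (roots : List String), Dom_path_under_roots_py path_ref roots → Spec_path_under_roots_py path_ref roots (path_under_roots_py path_ref roots)

-- ===== LEMMAS AND PROOFS =====

-- membership in the prefix set built by B's fold over enumerate
theorem mem_prefix_fold (n : List Char) (l : List (Int × Char)) (s0 : PySem.Set (List Char))
    (r : List Char) :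
    r ∈ l.foldl
        (fun s p =>
          if p.2 = '/' then PySem.Set.add s (PySem.List.slice n none (some p.1)) else s) s0 ↔
      r ∈ s0 ∨ ∃ p ∈ l, p.2 = '/' ∧ r = PySem.List.slice n none (some p.1) := by
  induction l generalizing s0 with
  | nil => simp
  | cons q l ih =>
    simp only [List.foldl_cons, List.mem_cons]
    by_cases hq : q.2 = '/'
    · rw [if_pos hq, ih]
      constructor
      · rintro (h | ⟨p, hp, h⟩)
        · rcases (PySem.Set.mem_add _ _ _).mp h with h | h
          · exact Or.inl h
          · exact Or.inr ⟨q, Or.inl rfl, hq, h⟩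
        · exact Or.inr ⟨p, Or.inr hp, h⟩
      · rintro (h | ⟨p, (rfl | hp), h⟩)
        · exact Or.inl ((PySem.Set.mem_add _ _ _).mpr (Or.inl h))
        · exact Or.inl ((PySem.Set.mem_add _ _ _).mpr (Or.inr h.2))
        · exact Or.inr ⟨p, hp, h⟩
    · rw [if_neg hq, ih]
      constructor
      · rintro (h | ⟨p, hp, h⟩)
        · exact Or.inl h
        · exact Or.inr ⟨p, Or.inr hp, h⟩
      · rintro (h | ⟨p, (rfl | hp), h⟩)
        · exact Or.inl h
        · exact absurd h.1 hq
        · exact Or.inr ⟨p, hp, h⟩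

-- A's startswith(root + "/") test characterised: root is n cut at a '/' boundary
theorem startswith_slash_iff (n r : List Char) :
    PySem.Chars.startswith n (r ++ ['/']) = true ↔
      ∃ k, ∃ _ : k < n.length, n[k] = '/' ∧ r = n.take k := by
  rw [PySem.Chars.startswith_iff]
  constructor
  · rintro ⟨t, ht⟩
    subst ht
    refine ⟨r.length, by simp, ?_, ?_⟩
    · simp
    · rw [List.append_assoc, List.take_left]
  · rintro ⟨k, hk, hc, rfl⟩
    refine ⟨n.drop (k + 1), ?_⟩
    conv_rhs => rw [← List.take_append_drop k n, List.drop_eq_getElem_cons hk]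
    simp [hc]

theorem body_eq (n rt : List Char) :
    (if PySem.Chars.strip rt ≠ [] then
        (n == rt) || PySem.Chars.startswith n (rt ++ ['/'])
      else false)
    = ((!decide (PySem.Chars.strip rt = [])) &&
        PySem.Set.contains
          ((PySem.List.enumerate n).foldl
            (fun s p =>
              if p.2 = '/' then PySem.Set.add s (PySem.List.slice n none (some p.1)) else s)
            (PySem.Set.ofList [n])) rt) := by
  by_cases hs : PySem.Chars.strip rt = []
  · simp [hs]
  · rw [if_pos hs, decide_eq_false hs]
    simp only [Bool.not_false, Bool.true_and]
    rw [Bool.eq_iff_iff]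
    simp only [Bool.or_eq_true, beq_iff_eq, PySem.Set.contains_iff, mem_prefix_fold]
    constructor
    · rintro (h | h)
      · exact Or.inl ((PySem.Set.mem_ofList _ _).mpr (by simp [h.symm]))
      · obtain ⟨k, hk, hc, hr⟩ := (startswith_slash_iff n rt).mp h
        refine Or.inr ⟨((0 : Int) + k, n[k]), ?_, hc, ?_⟩
        · rw [PySem.List.mem_enumerate_iff]; exact ⟨k, hk, rfl⟩
        · rw [PySem.List.slice_to n (b := (0 : Int) + k) (by omega)]
          simpa using hr
    · rintro (h | ⟨p, hp, hc, hr⟩)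
      · have : rt = n := by simpa using (PySem.Set.mem_ofList _ _).mp h
        exact Or.inl this.symm
      · right
        rw [PySem.List.mem_enumerate_iff] at hp
        obtain ⟨k, hk, rfl⟩ := hp
        refine (startswith_slash_iff n rt).mpr ⟨k, hk, hc, ?_⟩
        rw [PySem.List.slice_to n (b := (0 : Int) + k) (by omega)] at hr
        simpa using hr

-- ===== VERDICT (by name: the statement is the Claim_ definition above) =====
theorem path_under_roots_py_spec : Claim_equal_path_under_roots_py := by
  intro path_ref roots _
  unfold Spec_path_under_roots_py path_under_roots_py path_under_roots_py_alt
  set n := PySem.Chars.stripChars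
      (PySem.Chars.strip (if path_ref.toList = [] then [] else path_ref.toList)) ['/'] with hn
  by_cases h : n = []
  · simp [h]
  · rw [if_neg h, if_neg h]
    congr 1
    funext root
    exact body_eq n root.toList
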